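-- pv_equiv track=rewrite | github.com/wani3000/threadbot-ieumnarae | src/threadbot/dashboard.py | build_recommended_posts
-- ===== SOURCE A (Python) =====
-- from typing import Dict, List, Optional
--
-- def build_recommended_posts(signals: List[Dict], max_items: int = 5) -> List[Dict]:
--     if not signals:
--         return []
--
--     picked = []
--     used = set()
--     for signal in signals:
--         title = signal.get("title", "")
--         link = signal.get("link", "")
--         key = (title.strip().lower(), link.strip().lower())
--         if key in used:
--             continue
--         used.add(key)
--
--         summary = signal.get("summary", "")
--         airline = signal.get("airline") or "항공사"
--         post = (
--             f"[이번 주 {airline} 취업 포인트]\n"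
--             f"{title}\n\n"
--             f"핵심: {summary[:200]}\n"
--             f"지원 전 체크: 일정/자격요건/근무지 꼭 원문으로 재확인하세요.\n"
--             f"원문: {link}"
--         )
--         picked.append({"title": title, "post": post, "source": link})
--         if len(picked) >= max_items:
--             break
--
--     return picked
-- ===== SOURCE B (Python) =====
-- from typing import Dict, List, Optional
--
--
-- def _key(sig):
--     return (sig.get("title", "").strip().lower(), sig.get("link", "").strip().lower())
--
--
-- def _format(sig):
--     title = sig.get("title", "")
--     link = sig.get("link", "")
--     summary = sig.get("summary", "")
--     airline = sig.get("airline") or "항공사"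
--     post = (
--         f"[이번 주 {airline} 취업 포인트]\n"
--         f"{title}\n\n"
--         f"핵심: {summary[:200]}\n"
--         f"지원 전 체크: 일정/자격요건/근무지 꼭 원문으로 재확인하세요.\n"
--         f"원문: {link}"
--     )
--     return {"title": title, "post": post, "source": link}
--
--
-- def build_recommended_posts(sigs: List[Dict], max_items: int = 5) -> List[Dict]:
--     uniq = {}
--     for sig in sigs:
--         uniq.setdefault(_key(sig), sig)
--     out = []
--     for sig in uniq.values():
--         out.append(_format(sig))
--         if len(out) >= max_items:
--             break
--     return out
-- ===== Notes on version B (the rewrite author's own statement) =====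
-- stated objective: alternative
-- what changed: Replaces A's single fused loop (seen-set dedup + formatting + cap all interleaved, with an early break) by a two-phase pipeline: a dict.setdefault pass keyed by the normalised (title, link) pair that deduplicates the signals, then a separate formatting loop over the dict's values with the same post-append cap.
import Mathlib
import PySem

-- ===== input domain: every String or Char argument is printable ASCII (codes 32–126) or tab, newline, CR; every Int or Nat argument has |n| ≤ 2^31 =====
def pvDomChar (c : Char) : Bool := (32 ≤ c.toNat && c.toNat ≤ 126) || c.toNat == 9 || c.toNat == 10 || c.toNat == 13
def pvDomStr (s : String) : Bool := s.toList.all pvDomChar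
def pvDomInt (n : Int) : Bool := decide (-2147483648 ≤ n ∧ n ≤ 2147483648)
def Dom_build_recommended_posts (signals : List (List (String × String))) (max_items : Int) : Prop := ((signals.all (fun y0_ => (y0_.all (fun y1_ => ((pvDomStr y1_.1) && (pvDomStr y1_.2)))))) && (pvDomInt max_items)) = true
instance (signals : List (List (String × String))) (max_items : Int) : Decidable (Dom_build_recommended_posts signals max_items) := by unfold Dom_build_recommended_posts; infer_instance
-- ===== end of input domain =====

-- B replaces A's fused dedup/format/cap loop by a dict-based dedup pass (dict.setdefault keyed by the
-- normalised (title, link) pair) followed by a separate formatting loop with the same post-append cap;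
-- objective: alternative decomposition, not claimed faster.

-- ===== PORT A =====
-- A's single loop: skip already-used keys, format, append, break once len(picked) >= max_items.
def pvLoopA (signals : List (List (String × String))) (picked : List (List (String × String)))
    (used : PySem.Set (String × String)) (max_items : Int) : List (List (String × String)) :=
  match signals with
  | [] => picked
  | signal :: rest =>
    let d := PySem.Dict.mk signal
    let title := d.getD "title" ""
    let link := d.getD "link" ""
    let key := (PySem.Str.lower (PySem.Str.strip title), PySem.Str.lower (PySem.Str.strip link))
    if PySem.Set.contains used key then
      pvLoopA rest picked used max_items
    else
      let used' := PySem.Set.add used key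
      let summary := d.getD "summary" ""
      let airline := match d.get? "airline" with
        | none => "항공사"
        | some a => if a = "" then "항공사" else a
      let post := "[이번 주 " ++ airline ++ " 취업 포인트]\n" ++ title ++ "\n\n핵심: "
        ++ PySem.Str.slice summary none (some 200)
        ++ "\n지원 전 체크: 일정/자격요건/근무지 꼭 원문으로 재확인하세요.\n원문: " ++ link
      let picked' := picked ++ [[("title", title), ("post", post), ("source", link)]]
      if max_items ≤ PySem.List.len picked' then picked'
      else pvLoopA rest picked' used' max_items

def build_recommended_posts (signals : List (List (String × String))) (max_items : Int) : List (List (String × String)) :=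
  if signals = [] then []
  else pvLoopA signals [] PySem.Set.empty max_items

-- ===== PORT B =====
def pvKeyB (signal : List (String × String)) : String × String :=
  ((PySem.Dict.mk signal).getD "title" "" |> PySem.Str.strip |> PySem.Str.lower,
   (PySem.Dict.mk signal).getD "link" "" |> PySem.Str.strip |> PySem.Str.lower)

def pvFormatB (signal : List (String × String)) : List (String × String) :=
  let d := PySem.Dict.mk signal
  let title := d.getD "title" ""
  let link := d.getD "link" ""
  let summary := d.getD "summary" ""
  let airline := match d.get? "airline" with
    | none => "항공사"
    | some a => if a = "" then "항공사" else a
  let post := "[이번 주 " ++ airline ++ " 취업 포인트]\n" ++ title ++ "\n\n핵심: "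
    ++ PySem.Str.slice summary none (some 200)
    ++ "\n지원 전 체크: 일정/자격요건/근무지 꼭 원문으로 재확인하세요.\n원문: " ++ link
  [("title", title), ("post", post), ("source", link)]

-- B's second pass: format each deduplicated signal, stop once max_items are collected.
def pvEmitB (uniq : List (List (String × String))) (out : List (List (String × String)))
    (max_items : Int) : List (List (String × String)) :=
  match uniq with
  | [] => out
  | signal :: rest =>
    let out' := out ++ [pvFormatB signal]
    if max_items ≤ PySem.List.len out' then out'
    else pvEmitB rest out' max_items

def build_recommended_posts_alt (signals : List (List (String × String))) (max_items : Int) : List (List (String × String)) :=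
  pvEmitB (signals.foldl (fun d signal => d.setdefault (pvKeyB signal) signal)
    (PySem.Dict.empty : PySem.Dict (String × String) (List (String × String)))).values [] max_items

-- ===== PRECONDITION & SPEC =====
def Spec_build_recommended_posts (signals : List (List (String × String))) (max_items : Int) (out : List (List (String × String))) : Prop := out = build_recommended_posts_alt signals max_items
instance (signals : List (List (String × String))) (max_items : Int) (out : List (List (String × String))) : Decidable (Spec_build_recommended_posts signals max_items out) := by unfold Spec_build_recommended_posts; infer_instance

-- ===== CLAIM (what is proved, stated in full; the proofs are below) =====
def Claim_equal_build_recommended_posts : Prop := ∀ (signals : List (List (String × String))) (max_items : Int), Dom_build_recommended_posts signals max_items → Spec_build_recommended_posts signals max_items (build_recommended_posts signals max_items)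

-- ===== LEMMAS AND PROOFS =====

-- the list of signals A would keep, starting from a list `seen` of already-used keys
def pvUniqSpec (signals : List (List (String × String))) (seen : List (String × String)) :
    List (List (String × String)) :=
  match signals with
  | [] => []
  | s :: rest =>
    if seen.contains (pvKeyB s) then pvUniqSpec rest seen
    else s :: pvUniqSpec rest (seen ++ [pvKeyB s])

theorem pvLoopA_eq_emit (signals : List (List (String × String))) (picked : List (List (String × String)))
    (seen : List (String × String)) (m : Int) :
    pvLoopA signals picked (PySem.Set.ofList seen) m = pvEmitB (pvUniqSpec signals seen) picked m := by
  induction signals generalizing picked seen with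
  | nil => simp [pvLoopA, pvUniqSpec, pvEmitB]
  | cons s rest ih =>
    by_cases hm : pvKeyB s ∈ seen
    · have h1 : PySem.Set.contains (PySem.Set.ofList seen) (pvKeyB s) = true := by
        simp [PySem.Set.mem_ofList, hm]
      have h2 : seen.contains (pvKeyB s) = true := by simpa [List.contains_iff_mem] using hm
      simp only [pvKeyB] at h1 h2
      simp only [pvLoopA, pvUniqSpec, pvKeyB, h1, h2, if_true]
      exact ih picked seen
    · have hofl : PySem.Set.add (PySem.Set.ofList seen) (pvKeyB s) = PySem.Set.ofList (seen ++ [pvKeyB s]) := by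
        rw [PySem.Set.ofList_eq_foldl, PySem.Set.ofList_eq_foldl, List.foldl_append]
        rfl
      have h1 : PySem.Set.contains (PySem.Set.ofList seen) (pvKeyB s) = false := by
        simp [PySem.Set.mem_ofList, hm]
      have h2 : seen.contains (pvKeyB s) = false := by simpa [List.contains_iff_mem] using hm
      simp only [pvKeyB] at h1 h2 hofl
      simp only [pvLoopA, pvUniqSpec, pvEmitB, pvKeyB, pvFormatB, h1, h2,
        Bool.false_eq_true, if_false]
      split_ifs with hcap
      · rfl
      · rw [hofl]; exact ih _ _

theorem pvFoldl_setdefault_values (signals : List (List (String × String)))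
    (d : PySem.Dict (String × String) (List (String × String))) (hnd : d.keys.Nodup) :
    (signals.foldl (fun d signal => d.setdefault (pvKeyB signal) signal) d).values
      = d.values ++ pvUniqSpec signals d.keys := by
  induction signals generalizing d with
  | nil => simp [pvUniqSpec]
  | cons s rest ih =>
    simp only [List.foldl_cons, pvUniqSpec]
    by_cases hc : d.contains (pvKeyB s) = true
    · rw [PySem.Dict.setdefault_of_contains _ _ hc, ih d hnd]
      have : d.keys.contains (pvKeyB s) = true := by
        simpa [List.contains_iff_mem] using (PySem.Dict.contains_iff_mem_keys _ _).1 hc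
      rw [if_pos this]
    · have hc' : d.contains (pvKeyB s) = false := by simpa using hc
      rw [PySem.Dict.setdefault_of_not_contains _ _ hc']
      have hk : (d.insert (pvKeyB s) s).keys = d.keys ++ [pvKeyB s] :=
        PySem.Dict.keys_insert_of_not_contains _ _ hc'
      have hnd' : (d.insert (pvKeyB s) s).keys.Nodup := PySem.Dict.nodup_keys_insert d (pvKeyB s) s hnd
      rw [ih _ hnd', hk]
      have hv : (d.insert (pvKeyB s) s).values = d.values ++ [s] := by
        simp [PySem.Dict.values, PySem.Dict.items_insert_of_not_contains _ _ hc']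
      rw [hv]
      have hm : ¬ d.keys.contains (pvKeyB s) = true := by
        intro h
        exact absurd ((PySem.Dict.contains_iff_mem_keys _ _).2 (by simpa [List.contains_iff_mem] using h)) (by simp [hc'])
      rw [if_neg hm]
      simp

-- ===== VERDICT (by name: the statement is the Claim_ definition above) =====
theorem build_recommended_posts_spec : Claim_equal_build_recommended_posts := by
  intro signals m _
  unfold Spec_build_recommended_posts build_recommended_posts build_recommended_posts_alt
  rw [pvFoldl_setdefault_values signals PySem.Dict.empty (by simp [PySem.Dict.keys_empty])]
  by_cases h : signals = []
  · subst h; simp [pvUniqSpec, pvEmitB, PySem.Dict.values, PySem.Dict.empty]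
  · rw [if_neg h]
    have := pvLoopA_eq_emit signals [] [] m
    simpa [PySem.Set.ofList, PySem.Dict.values, PySem.Dict.empty] using this
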